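-- pv_equiv track=rewrite | github.com/vpovarna/AdventOfCode | python/2022/day22/day22.py | parse_board
-- ===== SOURCE A (Python) =====
-- def parse_board(raw_board: str):
--     board = raw_board.split("\n")
--
--     nr_rows = len(board)
--     nr_cols = max([len(row) for row in board])
--
--     bound_row = [[nr_cols, -1] for _ in range(nr_rows)]
--     bound_col = [[nr_rows, -1] for _ in range(nr_cols)]
--
--     adj = set()
--     for row, line in enumerate(board):
--         for col in range(len(line)):
--             c = line[col]
--             if c == ".":
--                 adj.add((row, col))
--
--             if c in [".", "#"]:
--                 bound_row[row][0] = min(bound_row[row][0], col)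
--                 bound_row[row][1] = max(bound_row[row][1], col)
--                 bound_col[col][0] = min(bound_col[col][0], row)
--                 bound_col[col][1] = max(bound_col[col][1], row)
--
--     return adj, bound_row, bound_col
-- ===== SOURCE B (Python) =====
-- def parse_board(raw_board: str):
--     board = raw_board.split("\n")
--
--     nr_rows = len(board)
--     nr_cols = max([len(row) for row in board])
--
--     # gather-then-reduce: collect the valid coordinates first, reduce with min/max afterwards
--     adj = {(r, c) for r, line in enumerate(board) for c, ch in enumerate(line) if ch == "."}
--
--     def bounds(idxs, default_lo):
--         if not idxs:
--             return [default_lo, -1]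
--         return [min(idxs), max(idxs)]
--
--     bound_row = [bounds([c for c, ch in enumerate(line) if ch in ".#"], nr_cols)
--                  for line in board]
--     bound_col = [bounds([r for r in range(nr_rows)
--                          if c < len(board[r]) and board[r][c] in ".#"], nr_rows)
--                  for c in range(nr_cols)]
--
--     return adj, bound_row, bound_col
-- ===== Notes on version B (the rewrite author's own statement) =====
-- stated objective: alternative
-- what changed: B gathers the valid coordinates first (a set comprehension for '.', per-line index lists and a per-column row scan) and then reduces each group with min/max, instead of A's single nested loop doing incremental in-place min/max updates on pre-built bound tables.
import Mathlib
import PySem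

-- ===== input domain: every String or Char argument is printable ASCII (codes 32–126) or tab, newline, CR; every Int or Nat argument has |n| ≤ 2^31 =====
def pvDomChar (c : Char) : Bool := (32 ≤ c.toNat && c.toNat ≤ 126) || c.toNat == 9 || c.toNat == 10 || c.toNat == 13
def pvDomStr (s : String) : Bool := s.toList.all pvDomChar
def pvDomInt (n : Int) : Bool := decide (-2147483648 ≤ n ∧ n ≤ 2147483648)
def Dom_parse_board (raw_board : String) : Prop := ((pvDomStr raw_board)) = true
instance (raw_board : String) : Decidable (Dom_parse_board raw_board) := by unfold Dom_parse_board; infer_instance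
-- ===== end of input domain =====

-- B re-implements the board parse as gather-then-reduce (collect valid coordinates, then take min/max
-- per row / per column) instead of A's running in-place min/max updates; objective: alternative.

-- ===== PORT A =====
-- c in [".", "#"]  (also used by B's 'ch in ".#"': both are the same two-character test)
def pvValid (c : Char) : Bool := c == '.' || c == '#'

-- the two Python statements 'e[0] = min(e[0], j); e[1] = max(e[1], j)' on a bounds pair e
def pvUpd2 (e : List Int) (j : Int) : List Int :=
  let e1 := PySem.List.pySetD e 0 (min (PySem.List.pyGetD e 0 0) j)
  PySem.List.pySetD e1 1 (max (PySem.List.pyGetD e1 1 0) j)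

-- 'b[i][0] = min(b[i][0], j); b[i][1] = max(b[i][1], j)'
def pvUpdRow (b : List (List Int)) (i j : Int) : List (List Int) :=
  PySem.List.pySetD b i (pvUpd2 (PySem.List.pyGetD b i []) j)

def pvMainA (board : List String) : (List (Int × Int)) × List (List Int) × List (List Int) :=
  let nr_rows : Int := PySem.List.len board
  let nr_cols : Int := (PySem.List.max? (board.map (fun row => PySem.Str.len row)) (fun x => x)).getD 0
  let bound_row : List (List Int) := (PySem.List.pyRange 0 nr_rows 1).map (fun _ => [nr_cols, -1])
  let bound_col : List (List Int) := (PySem.List.pyRange 0 nr_cols 1).map (fun _ => [nr_rows, -1])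
  (PySem.List.enumerate board).foldl (fun st rl =>
      (PySem.List.pyRange 0 (PySem.Str.len rl.2) 1).foldl (fun st2 col =>
        (if (PySem.List.pyGetD rl.2.toList col ' ') == '.' then PySem.Set.add st2.1 (rl.1, col) else st2.1,
         if pvValid (PySem.List.pyGetD rl.2.toList col ' ') then pvUpdRow st2.2.1 rl.1 col else st2.2.1,
         if pvValid (PySem.List.pyGetD rl.2.toList col ' ') then pvUpdRow st2.2.2 col rl.1 else st2.2.2)) st)
    (PySem.Set.empty, bound_row, bound_col)

def parse_board (raw_board : String) : (List (Int × Int)) × List (List Int) × List (List Int) :=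
  pvMainA ((PySem.Str.split? raw_board "\n").getD [])   -- sep "\n" ≠ "": split? is always some

-- ===== PORT B =====
-- [min(idxs), max(idxs)] if idxs else [default_lo, -1]
def pvBounds (idxs : List Int) (default_lo : Int) : List Int :=
  if idxs = [] then [default_lo, -1]
  else [(PySem.List.min? idxs (fun x => x)).getD 0, (PySem.List.max? idxs (fun x => x)).getD 0]

def pvMainB (board : List String) : (List (Int × Int)) × List (List Int) × List (List Int) :=
  let nr_rows : Int := PySem.List.len board
  let nr_cols : Int := (PySem.List.max? (board.map (fun row => PySem.Str.len row)) (fun x => x)).getD 0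
  let adj : List (Int × Int) := PySem.Set.ofList ((PySem.List.enumerate board).flatMap (fun rl =>
      ((PySem.List.enumerate rl.2.toList).filter (fun p => p.2 == '.')).map (fun p => (rl.1, p.1))))
  let bound_row : List (List Int) := board.map (fun line =>
      pvBounds (((PySem.List.enumerate line.toList).filter (fun p => pvValid p.2)).map (fun p => p.1)) nr_cols)
  let bound_col : List (List Int) := (PySem.List.pyRange 0 nr_cols 1).map (fun c =>
      pvBounds ((PySem.List.pyRange 0 nr_rows 1).filter (fun r =>
          decide (c < PySem.Str.len (PySem.List.pyGetD board r "")) &&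
          pvValid (PySem.List.pyGetD (PySem.List.pyGetD board r "").toList c ' ')) ) nr_rows)
  (adj, bound_row, bound_col)

def parse_board_alt (raw_board : String) : (List (Int × Int)) × List (List Int) × List (List Int) :=
  pvMainB ((PySem.Str.split? raw_board "\n").getD [])

-- ===== PRECONDITION & SPEC =====
def Spec_parse_board (raw_board : String) (out : (List (Int × Int)) × List (List Int) × List (List Int)) : Prop := out = parse_board_alt raw_board
instance (raw_board : String) (out : (List (Int × Int)) × List (List Int) × List (List Int)) : Decidable (Spec_parse_board raw_board out) := by unfold Spec_parse_board; infer_instance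

-- ===== CLAIM (what is proved, stated in full; the proofs are below) =====
def Claim_equal_parse_board : Prop := ∀ (raw_board : String), Dom_parse_board raw_board → Spec_parse_board raw_board (parse_board raw_board)

-- ===== LEMMAS AND PROOFS =====

-- the two bounds statements on a literal pair
theorem pvUpd2_pair (a b j : Int) : pvUpd2 [a, b] j = [min a j, max b j] := rfl

-- a fold whose body updates the three state components independently is three folds
theorem pvFoldlTriple {β σ1 σ2 σ3 : Type} (f : σ1 → β → σ1) (g : σ2 → β → σ2) (h : σ3 → β → σ3)
    (l : List β) (a : σ1) (b : σ2) (c : σ3) :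
    l.foldl (fun s e => (f s.1 e, g s.2.1 e, h s.2.2 e)) (a, b, c)
      = (l.foldl f a, l.foldl g b, l.foldl h c) := by
  induction l generalizing a b c with
  | nil => rfl
  | cons x t ih => simpa using ih (f a x) (g b x) (h c x)

theorem pvNestedTriple {σ1 σ2 σ3 β γ : Type} (L : β → List γ)
    (f : β → σ1 → γ → σ1) (g : β → σ2 → γ → σ2) (h : β → σ3 → γ → σ3)
    (l : List β) (a : σ1) (b : σ2) (c : σ3) :
    l.foldl (fun st rl => (L rl).foldl (fun s e => (f rl s.1 e, g rl s.2.1 e, h rl s.2.2 e)) st) (a, b, c)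
      = (l.foldl (fun x rl => (L rl).foldl (f rl) x) a,
         l.foldl (fun x rl => (L rl).foldl (g rl) x) b,
         l.foldl (fun x rl => (L rl).foldl (h rl) x) c) := by
  induction l generalizing a b c with
  | nil => rfl
  | cons rl t ih =>
    simp only [List.foldl_cons]
    rw [pvFoldlTriple (f rl) (g rl) (h rl) (L rl) a b c, ih]

theorem pvSetFoldFlat {β : Type} (F : β → List (Int × Int)) (l : List β) :
    ∀ (s : PySem.Set (Int × Int)),
      l.foldl (fun s x => PySem.Set.update s (F x)) s = PySem.Set.update s (l.flatMap F) := by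
  induction l with
  | nil => intro s; rfl
  | cons x t ih =>
    intro s
    rw [List.foldl_cons, ih, List.flatMap_cons, PySem.Set.update_append]

theorem pvInnerRowEnum (line : String) (r : Int) (b : List (List Int)) :
    (PySem.List.pyRange 0 (PySem.Str.len line) 1).foldl (fun b col =>
        if pvValid (PySem.List.pyGetD line.toList col ' ') then pvUpdRow b r col else b) b
      = (PySem.List.enumerate line.toList).foldl (fun b p =>
          if pvValid p.2 then pvUpdRow b r p.1 else b) b := by
  conv_rhs => rw [PySem.List.enumerate_eq_map_pyRange line.toList ' ', List.foldl_map]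
  rw [PySem.Str.len_eq, ← PySem.List.len_eq]

theorem pvInnerColEnum (line : String) (r : Int) (b : List (List Int)) :
    (PySem.List.pyRange 0 (PySem.Str.len line) 1).foldl (fun b col =>
        if pvValid (PySem.List.pyGetD line.toList col ' ') then pvUpdRow b col r else b) b
      = (PySem.List.enumerate line.toList).foldl (fun b p =>
          if pvValid p.2 then pvUpdRow b p.1 r else b) b := by
  conv_rhs => rw [PySem.List.enumerate_eq_map_pyRange line.toList ' ', List.foldl_map]
  rw [PySem.Str.len_eq, ← PySem.List.len_eq]

theorem pvAdjInner (rl : Int × String) (a : PySem.Set (Int × Int)) :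
    (PySem.List.pyRange 0 (PySem.Str.len rl.2) 1).foldl (fun a col =>
        if (PySem.List.pyGetD rl.2.toList col ' ') == '.' then PySem.Set.add a (rl.1, col) else a) a
      = PySem.Set.update a (((PySem.List.enumerate rl.2.toList).filter (fun p => p.2 == '.')).map
          (fun p => (rl.1, p.1))) := by
  have h1 : (PySem.List.pyRange 0 (PySem.Str.len rl.2) 1).foldl (fun a col =>
        if (PySem.List.pyGetD rl.2.toList col ' ') == '.' then PySem.Set.add a (rl.1, col) else a) a
      = (PySem.List.enumerate rl.2.toList).foldl (fun a p =>
          if p.2 == '.' then PySem.Set.add a (rl.1, p.1) else a) a := by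
    conv_rhs => rw [PySem.List.enumerate_eq_map_pyRange rl.2.toList ' ', List.foldl_map]
    rw [PySem.Str.len_eq, ← PySem.List.len_eq]
  rw [h1]
  rw [show (fun (a : PySem.Set (Int × Int)) (p : Int × Char) => if (p.2 == '.') = true then a.add (rl.1, p.1) else a)
        = (fun a p => if (fun (p : Int × Char) => p.2 == '.') p = true then (fun (a : PySem.Set (Int × Int)) (p : Int × Char) => a.add (rl.1, p.1)) a p else a) from rfl]
  rw [PySem.List.foldl_if_eq_foldl_filter, ← PySem.Set.update_map_eq_foldl_add]

theorem pvRowCollapse (l : List (Int × Char)) :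
    ∀ (k : Nat) (b : List (List Int)), (hk : k < b.length) →
    l.foldl (fun b p => if pvValid p.2 then pvUpdRow b (k : Int) p.1 else b) b
      = b.set k (l.foldl (fun e p => if pvValid p.2 then pvUpd2 e p.1 else e) (b.getD k [])) := by
  induction l with
  | nil =>
    intro k b hk
    rw [List.foldl_nil, List.foldl_nil, List.getD_eq_getElem _ _ hk, List.set_getElem_self hk]
  | cons p t ih =>
    intro k b hk
    by_cases hv : pvValid p.2
    · simp only [List.foldl_cons, if_pos hv]
      have hUpd : pvUpdRow b (k : Int) p.1 = b.set k (pvUpd2 (b.getD k []) p.1) := by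
        unfold pvUpdRow
        rw [PySem.List.pySetD_natCast, PySem.List.pyGetD_natCast]
      rw [hUpd, ih k _ (by simpa using hk)]
      simp [hk, List.set_set]
    · simp only [List.foldl_cons, if_neg hv]
      exact ih k b hk

theorem pvBrowFold (bs : List String) :
    ∀ (s : Nat) (b : List (List Int)), s + bs.length ≤ b.length → ∀ (j : Nat),
    ((PySem.List.enumerate bs (s : Int)).foldl (fun x rl =>
        (PySem.List.pyRange 0 (PySem.Str.len rl.2) 1).foldl (fun b col =>
          if pvValid (PySem.List.pyGetD rl.2.toList col ' ') then pvUpdRow b rl.1 col else b) x) b).getD j []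
      = if s ≤ j ∧ j < s + bs.length then
          (PySem.List.enumerate (bs.getD (j - s) "").toList).foldl (fun e p =>
            if pvValid p.2 then pvUpd2 e p.1 else e) (b.getD j [])
        else b.getD j [] := by
  induction bs with
  | nil =>
    intro s b _ j
    rw [PySem.List.enumerate_nil, List.foldl_nil]
    simp only [List.length_nil]
    rw [if_neg (by omega)]
  | cons line rest ih =>
    intro s b hlen j
    rw [PySem.List.enumerate_cons, List.foldl_cons]
    simp only []
    have hs : s < b.length := by simp at hlen; omega
    have hbody : (PySem.List.pyRange 0 (PySem.Str.len line) 1).foldl (fun b col =>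
          if pvValid (PySem.List.pyGetD line.toList col ' ') then pvUpdRow b (s : Int) col else b) b
        = b.set s ((PySem.List.enumerate line.toList).foldl (fun e p =>
            if pvValid p.2 then pvUpd2 e p.1 else e) (b.getD s [])) := by
      rw [pvInnerRowEnum line (s : Int) b, pvRowCollapse _ s b hs, List.getD_eq_getElem _ _ hs]
    rw [hbody]
    have hcast : ((s : Int) + 1) = ((s + 1 : Nat) : Int) := by push_cast; ring
    rw [hcast, ih (s + 1) _ (by simp at hlen ⊢; omega) j]
    by_cases h1 : s ≤ j
    · by_cases h2 : j = s
      · subst h2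
        rw [if_neg (by omega), if_pos (by simp)]
        have : j - j = 0 := by omega
        rw [this, List.getD_cons_zero]
        rw [List.getD_eq_getElem _ _ (by simpa using hs), List.getElem_set_self (by simpa using hs),
            List.getD_eq_getElem _ _ hs]
      · have h1' : s + 1 ≤ j := by omega
        have hgj : (b.set s ((PySem.List.enumerate line.toList).foldl (fun e p =>
            if pvValid p.2 then pvUpd2 e p.1 else e) b[s])).getD j []
            = b.getD j [] := by
          by_cases hj : j < b.length
          · rw [List.getD_eq_getElem _ _ (by simpa using hj),
                List.getElem_set_ne (by omega), List.getD_eq_getElem _ _ hj]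
          · rw [List.getD_eq_default _ _ (by simpa using (Nat.le_of_not_lt hj)),
                List.getD_eq_default _ _ (Nat.le_of_not_lt hj)]
        rw [List.getD_eq_getElem _ _ hs] at *
        by_cases h3 : j < s + (line :: rest).length
        · rw [if_pos (by simp at h3 ⊢; omega), if_pos (by simp at h3 ⊢; omega), hgj]
          have : j - s = (j - (s+1)) + 1 := by omega
          rw [this, List.getD_cons_succ]
        · rw [if_neg (by simp at h3 ⊢; omega), if_neg (by simp at h3 ⊢; omega), hgj]
    · rw [if_neg (by omega), if_neg (by omega)]
      rw [List.getD_eq_getElem _ _ hs]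
      by_cases hj : j < b.length
      · rw [List.getD_eq_getElem _ _ (by simpa using hj),
            List.getElem_set_ne (by omega), List.getD_eq_getElem _ _ hj]
      · rw [List.getD_eq_default _ _ (by simpa using (Nat.le_of_not_lt hj)),
            List.getD_eq_default _ _ (Nat.le_of_not_lt hj)]

theorem pvUpdFoldPair (xs : List Int) :
    ∀ (a b : Int), xs.foldl (fun e x => pvUpd2 e x) [a, b] = [xs.foldl min a, xs.foldl max b] := by
  induction xs with
  | nil => intro a b; rfl
  | cons x t ih => intro a b; rw [List.foldl_cons, pvUpd2_pair, ih, List.foldl_cons, List.foldl_cons]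

theorem pvBoundsFold (xs : List Int) (dlo : Int) (h : ∀ x ∈ xs, 0 ≤ x ∧ x < dlo) :
    [xs.foldl min dlo, xs.foldl max (-1)] = pvBounds xs dlo := by
  match xs with
  | [] => rfl
  | x :: t =>
    obtain ⟨hx0, hxd⟩ := h x (List.mem_cons_self)
    unfold pvBounds
    rw [if_neg (by simp), PySem.List.min?_id_cons, PySem.List.max?_id_cons]
    rw [List.foldl_cons, List.foldl_cons, min_eq_right (le_of_lt hxd), max_eq_right (by omega : (-1:Int) ≤ x)]
    rfl

theorem pvRowRedEq (line : String) (C : Int) (hline : (line.toList.length : Int) ≤ C) :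
    (PySem.List.enumerate line.toList).foldl (fun e p =>
        if pvValid p.2 then pvUpd2 e p.1 else e) [C, -1]
      = pvBounds (((PySem.List.enumerate line.toList).filter (fun p => pvValid p.2)).map
          (fun p => p.1)) C := by
  rw [show (fun (e : List Int) (p : Int × Char) => if pvValid p.2 = true then pvUpd2 e p.1 else e)
      = (fun e p => if (fun (p : Int × Char) => pvValid p.2) p = true
          then (fun (e : List Int) (p : Int × Char) => pvUpd2 e p.1) e p else e) from rfl]
  rw [PySem.List.foldl_if_eq_foldl_filter]
  rw [show (fun (e : List Int) (p : Int × Char) => pvUpd2 e p.1)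
      = (fun (e : List Int) (p : Int × Char) => (fun (e : List Int) (x : Int) => pvUpd2 e x) e ((fun (p : Int × Char) => p.1) p)) from rfl]
  rw [← List.foldl_map]
  rw [pvUpdFoldPair, ← pvBoundsFold]
  intro x hx
  simp only [List.mem_map, List.mem_filter] at hx
  obtain ⟨p, ⟨hpe, _⟩, rfl⟩ := hx
  rw [PySem.List.mem_enumerate_iff] at hpe
  obtain ⟨k, hk, rfl⟩ := hpe
  constructor
  · simp
  · simp only [zero_add]
    calc (k : Int) < line.toList.length := by exact_mod_cast hk
      _ ≤ C := hline

theorem pvColInner (l : List (Int × Char)) :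
    ∀ (b : List (List Int)) (r : Int) (j : Nat),
      (∀ p ∈ l, 0 ≤ p.1 ∧ p.1 < (b.length : Int)) →
    (l.foldl (fun b p => if pvValid p.2 then pvUpdRow b p.1 r else b) b).getD j []
      = l.foldl (fun e p => if p.1 = (j : Int) ∧ pvValid p.2 = true then pvUpd2 e r else e) (b.getD j []) := by
  induction l with
  | nil => intro b r j _; rfl
  | cons p t ih =>
    obtain ⟨pi, pc⟩ := p
    intro b r j hl
    obtain ⟨hp0, hpl⟩ := hl (pi, pc) (List.mem_cons_self)
    simp only [] at hp0 hpl
    obtain ⟨k, rfl⟩ : ∃ k : Nat, pi = (k : Int) := ⟨pi.toNat, (Int.toNat_of_nonneg hp0).symm⟩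
    have hkl : k < b.length := by exact_mod_cast hpl
    rw [List.foldl_cons, List.foldl_cons]
    simp only []
    by_cases hv : pvValid pc
    · rw [if_pos hv]
      rw [show pvUpdRow b (k : Int) r = b.set k (pvUpd2 (b.getD k []) r) from by
        unfold pvUpdRow; rw [PySem.List.pySetD_natCast, PySem.List.pyGetD_natCast]]
      rw [ih _ r j (by intro q hq; have := hl q (List.mem_cons_of_mem _ hq); simpa using this)]
      by_cases hj : k = j
      · subst hj
        rw [if_pos ⟨rfl, hv⟩]
        congr 1
        rw [List.getD_eq_getElem _ _ (by simpa using hkl), List.getElem_set_self (by simpa using hkl),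
            List.getD_eq_getElem _ _ hkl]
      · rw [if_neg (by rintro ⟨h1, -⟩; exact hj (by exact_mod_cast h1))]
        congr 1
        by_cases hjb : j < b.length
        · rw [List.getD_eq_getElem _ _ (by simpa using hjb),
              List.getElem_set_ne (by omega), List.getD_eq_getElem _ _ hjb]
        · rw [List.getD_eq_default _ _ (by simpa using (Nat.le_of_not_lt hjb)),
              List.getD_eq_default _ _ (Nat.le_of_not_lt hjb)]
    · rw [if_neg hv, if_neg (by tauto)]
      exact ih b r j (fun q hq => hl q (List.mem_cons_of_mem _ hq))

theorem pvEnumProbe (cs : List Char) :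
    ∀ (s j : Nat) (e : List Int) (r : Int),
    (PySem.List.enumerate cs (s : Int)).foldl (fun e p =>
        if p.1 = (j : Int) ∧ pvValid p.2 = true then pvUpd2 e r else e) e
      = if s ≤ j ∧ j < s + cs.length ∧ pvValid (cs.getD (j - s) ' ') = true then pvUpd2 e r else e := by
  induction cs with
  | nil =>
    intro s j e r
    rw [PySem.List.enumerate_nil, List.foldl_nil]
    rw [if_neg (by simp only [List.length_nil]; omega)]
  | cons c cs ih =>
    intro s j e r
    rw [PySem.List.enumerate_cons, List.foldl_cons]
    simp only []
    have hcast : ((s : Int) + 1) = ((s + 1 : Nat) : Int) := by push_cast; ring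
    rw [hcast, ih (s + 1) j _ r]
    by_cases h2 : s = j
    · subst h2
      have houter : ¬ (s + 1 ≤ s ∧ s < s + 1 + cs.length ∧ pvValid (cs.getD (s - (s + 1)) ' ') = true) := by
        rintro ⟨h1, -⟩; omega
      rw [if_neg houter]
      simp only [List.length_cons, Nat.sub_self, List.getD_cons_zero]
      refine if_congr ?_ rfl rfl
      constructor
      · rintro ⟨-, h⟩; exact ⟨le_rfl, by omega, h⟩
      · rintro ⟨-, -, h⟩; exact ⟨by simp, h⟩
    · have hinner : ¬ (((s : Int) = (j : Int)) ∧ pvValid c = true) := by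
        rintro ⟨h1, -⟩; exact h2 (by exact_mod_cast h1)
      rw [if_neg hinner]
      by_cases hsj : s ≤ j
      · have hgt : s < j := by omega
        have hms : j - s = (j - (s + 1)) + 1 := by omega
        rw [hms, List.getD_cons_succ]
        refine if_congr ?_ rfl rfl
        simp only [List.length_cons]
        constructor
        · rintro ⟨h1, h2, h3⟩; exact ⟨by omega, by omega, h3⟩
        · rintro ⟨h1, h2, h3⟩; exact ⟨by omega, by omega, h3⟩
      · rw [if_neg (by rintro ⟨h1, -⟩; omega), if_neg (by rintro ⟨h1, -⟩; omega)]

theorem pvFoldLen {β : Type} (f : List (List Int) → β → List (List Int))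
    (h : ∀ b x, (f b x).length = b.length) :
    ∀ (l : List β) (b : List (List Int)), (l.foldl f b).length = b.length := by
  intro l
  induction l with
  | nil => intro b; rfl
  | cons x t ih => intro b; rw [List.foldl_cons, ih, h]

theorem pvInnerRowLen (line : String) (r : Int) (b : List (List Int)) :
    ((PySem.List.pyRange 0 (PySem.Str.len line) 1).foldl (fun b col =>
        if pvValid (PySem.List.pyGetD line.toList col ' ') then pvUpdRow b r col else b) b).length
      = b.length := by
  apply pvFoldLen
  intro b col
  split_ifs
  · unfold pvUpdRow; rw [PySem.List.length_pySetD]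
  · rfl

theorem pvInnerColLen (line : String) (r : Int) (b : List (List Int)) :
    ((PySem.List.pyRange 0 (PySem.Str.len line) 1).foldl (fun b col =>
        if pvValid (PySem.List.pyGetD line.toList col ' ') then pvUpdRow b col r else b) b).length
      = b.length := by
  apply pvFoldLen
  intro b col
  split_ifs
  · unfold pvUpdRow; rw [PySem.List.length_pySetD]
  · rfl

theorem pvColOuter (l : List (Int × String)) :
    ∀ (b : List (List Int)) (j : Nat),
      (∀ rl ∈ l, (rl.2.toList.length : Int) ≤ (b.length : Int)) →
    (l.foldl (fun x rl =>
        (PySem.List.pyRange 0 (PySem.Str.len rl.2) 1).foldl (fun b col =>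
          if pvValid (PySem.List.pyGetD rl.2.toList col ' ') then pvUpdRow b col rl.1 else b) x) b).getD j []
      = l.foldl (fun e rl =>
          if decide ((j : Int) < PySem.Str.len rl.2) && pvValid (PySem.List.pyGetD rl.2.toList (j : Int) ' ')
          then pvUpd2 e rl.1 else e) (b.getD j []) := by
  induction l with
  | nil => intro b j _; rfl
  | cons rl t ih =>
    intro b j hl
    rw [List.foldl_cons, List.foldl_cons]
    have hlen1 := pvInnerColLen rl.2 rl.1 b
    rw [ih _ j (by intro q hq; rw [hlen1]; exact hl q (List.mem_cons_of_mem _ hq))]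
    congr 1
    rw [pvInnerColEnum rl.2 rl.1 b]
    rw [pvColInner _ b rl.1 j (by
      intro p hp
      rw [PySem.List.mem_enumerate_iff] at hp
      obtain ⟨k, hk, rfl⟩ := hp
      have := hl rl (List.mem_cons_self)
      constructor
      · simp
      · simp only [zero_add]
        calc (k : Int) < rl.2.toList.length := by exact_mod_cast hk
          _ ≤ (b.length : Int) := this)]
    have hprobe := pvEnumProbe rl.2.toList 0 j (b.getD j []) rl.1
    simp only [Nat.cast_zero, Nat.zero_add, Nat.sub_zero] at hprobe
    rw [hprobe]
    rw [PySem.Str.len_eq, PySem.List.pyGetD_natCast]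
    refine if_congr ?_ rfl rfl
    simp only [Bool.and_eq_true, decide_eq_true_eq, Nat.cast_lt]
    constructor
    · rintro ⟨-, h1, h2⟩; exact ⟨h1, h2⟩
    · rintro ⟨h1, h2⟩; exact ⟨Nat.zero_le _, h1, h2⟩

theorem pvColEntry (board : List String) (k : Nat) :
    (PySem.List.enumerate board).foldl (fun e rl =>
        if decide ((k : Int) < PySem.Str.len rl.2) && pvValid (PySem.List.pyGetD rl.2.toList (k : Int) ' ')
        then pvUpd2 e rl.1 else e) [PySem.List.len board, -1]
      = pvBounds ((PySem.List.pyRange 0 (PySem.List.len board) 1).filter (fun r =>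
          decide ((k : Int) < PySem.Str.len (PySem.List.pyGetD board r "")) &&
          pvValid (PySem.List.pyGetD (PySem.List.pyGetD board r "").toList (k : Int) ' ')))
          (PySem.List.len board) := by
  conv_lhs => rw [PySem.List.enumerate_eq_map_pyRange board "", List.foldl_map]
  rw [show (fun (e : List Int) (r : Int) =>
        if decide ((k : Int) < PySem.Str.len (r, PySem.List.pyGetD board r "").2) &&
            pvValid (PySem.List.pyGetD (r, PySem.List.pyGetD board r "").2.toList (k : Int) ' ')
        then pvUpd2 e (r, PySem.List.pyGetD board r "").1 else e)
      = (fun e r => if (fun (r : Int) => decide ((k : Int) < PySem.Str.len (PySem.List.pyGetD board r "")) &&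
            pvValid (PySem.List.pyGetD (PySem.List.pyGetD board r "").toList (k : Int) ' ')) r = true
          then (fun (e : List Int) (r : Int) => pvUpd2 e r) e r else e) from rfl]
  rw [PySem.List.foldl_if_eq_foldl_filter, pvUpdFoldPair, ← pvBoundsFold]
  intro x hx
  rw [List.mem_filter] at hx
  have := PySem.List.mem_pyRange_one.mp hx.1
  rw [PySem.List.len_eq] at this ⊢
  omega

theorem pvMain_eq (board : List String) : pvMainA board = pvMainB board := by
  simp only [pvMainA, pvMainB]
  rw [pvNestedTriple (fun rl : Int × String => PySem.List.pyRange 0 (PySem.Str.len rl.2) 1)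
      (fun rl a col => if (PySem.List.pyGetD rl.2.toList col ' ') == '.' then PySem.Set.add a (rl.1, col) else a)
      (fun rl b2 col => if pvValid (PySem.List.pyGetD rl.2.toList col ' ') then pvUpdRow b2 rl.1 col else b2)
      (fun rl b3 col => if pvValid (PySem.List.pyGetD rl.2.toList col ' ') then pvUpdRow b3 col rl.1 else b3)
      (PySem.List.enumerate board) PySem.Set.empty _ _]
  simp only [Prod.mk.injEq]
  refine ⟨?_, ?_, ?_⟩
  · -- adj
    rw [show (fun (x : PySem.Set (Int × Int)) (rl : Int × String) =>
          (PySem.List.pyRange 0 (PySem.Str.len rl.2) 1).foldl (fun a col =>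
            if (PySem.List.pyGetD rl.2.toList col ' ') == '.' then PySem.Set.add a (rl.1, col) else a) x)
        = (fun x rl => PySem.Set.update x (((PySem.List.enumerate rl.2.toList).filter (fun p => p.2 == '.')).map
            (fun p => (rl.1, p.1))))
        from funext fun x => funext fun rl => pvAdjInner rl x]
    rw [pvSetFoldFlat, show PySem.Set.empty = ([] : PySem.Set (Int × Int)) from rfl,
        PySem.Set.update_nil_left]
  · -- bound_row
    have hCl : ∀ line ∈ board, (line.toList.length : Int) ≤
        (PySem.List.max? (board.map (fun row => PySem.Str.len row)) (fun x => x)).getD 0 := by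
      intro line hline
      rcases hmax : PySem.List.max? (board.map (fun row => PySem.Str.len row)) (fun x => x) with _ | m
      · rw [PySem.List.max?_eq_none_iff] at hmax
        simp at hmax
        subst hmax
        simp at hline
      · have := PySem.List.max?_isMax hmax (PySem.Str.len line)
          (List.mem_map_of_mem hline)
        rw [PySem.Str.len_eq] at this
        simpa using this
    have hlenL : ∀ (b : List (List Int)),
        ((PySem.List.enumerate board).foldl (fun x rl =>
          (PySem.List.pyRange 0 (PySem.Str.len rl.2) 1).foldl (fun b col =>
            if pvValid (PySem.List.pyGetD rl.2.toList col ' ') then pvUpdRow b rl.1 col else b) x) b).length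
          = b.length := by
      intro b
      apply pvFoldLen
      intro b rl
      exact pvInnerRowLen rl.2 rl.1 b
    have hinitlen : ((PySem.List.pyRange 0 (PySem.List.len board) 1).map
        (fun _ => [(PySem.List.max? (board.map (fun row => PySem.Str.len row)) (fun x => x)).getD 0, -1])).length
        = board.length := by
      simp [PySem.List.length_pyRange_one, PySem.List.len_eq]
    apply List.ext_getElem
    · rw [hlenL, hinitlen, List.length_map]
    · intro j hj1 hj2
      rw [← List.getD_eq_getElem _ [] hj1, ← List.getD_eq_getElem _ [] hj2]
      have hjb : j < board.length := by rw [List.length_map] at hj2; exact hj2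
      have hb := pvBrowFold board 0 _ (by rw [hinitlen]; omega) j
      simp only [Nat.cast_zero, Nat.zero_add, Nat.sub_zero] at hb
      rw [hb, if_pos ⟨Nat.zero_le _, hjb⟩]
      have hinit : ((PySem.List.pyRange 0 (PySem.List.len board) 1).map
          (fun _ => [(PySem.List.max? (board.map (fun row => PySem.Str.len row)) (fun x => x)).getD 0, -1])).getD j []
          = [(PySem.List.max? (board.map (fun row => PySem.Str.len row)) (fun x => x)).getD 0, -1] := by
        rw [List.getD_eq_getElem _ [] (by rw [hinitlen]; omega), List.getElem_map]
      rw [hinit]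
      have hmem : board.getD j "" = board[j] := List.getD_eq_getElem _ _ hjb
      rw [hmem]
      rw [List.getD_eq_getElem (board.map _) [] hj2, List.getElem_map]
      exact pvRowRedEq board[j] _ (hCl board[j] (List.getElem_mem hjb))
  · -- bound_col
    have hC0 : 0 ≤ (PySem.List.max? (board.map (fun row => PySem.Str.len row)) (fun x => x)).getD 0 := by
      rcases hmax : PySem.List.max? (board.map (fun row => PySem.Str.len row)) (fun x => x) with _ | m
      · simp
      · have hm := PySem.List.max?_mem hmax
        obtain ⟨line, -, rfl⟩ := List.mem_map.mp hm
        rw [Option.getD_some, PySem.Str.len_eq]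
        exact Nat.cast_nonneg _
    have hCl : ∀ line ∈ board, (line.toList.length : Int) ≤
        (PySem.List.max? (board.map (fun row => PySem.Str.len row)) (fun x => x)).getD 0 := by
      intro line hline
      rcases hmax : PySem.List.max? (board.map (fun row => PySem.Str.len row)) (fun x => x) with _ | m
      · rw [PySem.List.max?_eq_none_iff] at hmax
        simp at hmax
        subst hmax
        simp at hline
      · have := PySem.List.max?_isMax hmax (PySem.Str.len line)
          (List.mem_map_of_mem hline)
        rw [PySem.Str.len_eq] at this
        simpa using this
    have hlenC : ∀ (b : List (List Int)),
        ((PySem.List.enumerate board).foldl (fun x rl =>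
          (PySem.List.pyRange 0 (PySem.Str.len rl.2) 1).foldl (fun b col =>
            if pvValid (PySem.List.pyGetD rl.2.toList col ' ') then pvUpdRow b col rl.1 else b) x) b).length
          = b.length := by
      intro b
      apply pvFoldLen
      intro b rl
      exact pvInnerColLen rl.2 rl.1 b
    apply List.ext_getElem
    · rw [hlenC, List.length_map, List.length_map]
    · intro k hk1 hk2
      rw [← List.getD_eq_getElem _ [] hk1, ← List.getD_eq_getElem _ [] hk2]
      have hkC : k < ((PySem.List.pyRange 0
          ((PySem.List.max? (board.map (fun row => PySem.Str.len row)) (fun x => x)).getD 0) 1)).length := by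
        rw [List.length_map] at hk2; exact hk2
      have hinitlen : ((PySem.List.pyRange 0
          ((PySem.List.max? (board.map (fun row => PySem.Str.len row)) (fun x => x)).getD 0) 1).map
          (fun _ => [PySem.List.len board, -1])).length
          = ((PySem.List.max? (board.map (fun row => PySem.Str.len row)) (fun x => x)).getD 0).toNat := by
        rw [List.length_map, PySem.List.length_pyRange_one]
        omega
      rw [pvColOuter _ _ k (by
        intro rl hrl
        rw [PySem.List.mem_enumerate_iff] at hrl
        obtain ⟨i, hi, rfl⟩ := hrl
        have := hCl board[i] (List.getElem_mem hi)
        rw [hinitlen]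
        calc ((board[i].toList.length : Int)) ≤ _ := this
          _ ≤ _ := by omega)]
      have hinit : ((PySem.List.pyRange 0
          ((PySem.List.max? (board.map (fun row => PySem.Str.len row)) (fun x => x)).getD 0) 1).map
          (fun _ => [PySem.List.len board, -1])).getD k []
          = [PySem.List.len board, -1] := by
        rw [List.getD_eq_getElem _ [] (by rw [hinitlen]; rw [PySem.List.length_pyRange_one] at hkC; omega),
            List.getElem_map]
      rw [hinit, pvColEntry board k]
      rw [List.getD_eq_getElem _ [] hk2, List.getElem_map, PySem.List.getElem_pyRange_one _ _ _ hkC]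
      simp only [zero_add]

-- ===== VERDICT (by name: the statement is the Claim_ definition above) =====
theorem parse_board_spec : Claim_equal_parse_board := by
  intro raw _
  unfold Spec_parse_board parse_board parse_board_alt
  exact pvMain_eq _
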